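-- pv_equiv track=rewrite | github.com/jeffjacobsen/prpgen | main/src/scripts/web_scraper.py | create_excerpt
-- ===== SOURCE A (Python) =====
-- def create_excerpt(content, max_length=300):
--     """Create an excerpt from content."""
--     # Remove markdown formatting
--     text = content
--     for pattern in ['#', '*', '_', '`', '[', ']', '(', ')', '>', '|']:
--         text = text.replace(pattern, '')
--
--     # Clean up whitespace
--     text = ' '.join(text.split())
--
--     if len(text) <= max_length:
--         return text
--
--     return text[:max_length].rsplit(' ', 1)[0] + '...'
-- ===== SOURCE B (Python) =====
-- def create_excerpt(content, max_length=300):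
--     """Create an excerpt from content."""
--     remove = set('#*_`[]()>|')
--     out = []
--     pending = False
--     for ch in content:
--         if ch in remove:
--             continue
--         if ch.isspace():
--             pending = True
--         else:
--             if pending and out:
--                 out.append(' ')
--             out.append(ch)
--             pending = False
--     text = ''.join(out)
--     if len(text) <= max_length:
--         return text
--     return text[:max_length].rsplit(' ', 1)[0] + '...'
-- ===== Notes on version B (the rewrite author's own statement) =====
-- stated objective: alternative
-- what changed: Replaced A's ten sequential str.replace passes plus a split/join whitespace pass by a single left-to-right pass that skips characters in a removal set and collapses whitespace runs with a pending-space flag; the truncation step is kept verbatim.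
import Mathlib
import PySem

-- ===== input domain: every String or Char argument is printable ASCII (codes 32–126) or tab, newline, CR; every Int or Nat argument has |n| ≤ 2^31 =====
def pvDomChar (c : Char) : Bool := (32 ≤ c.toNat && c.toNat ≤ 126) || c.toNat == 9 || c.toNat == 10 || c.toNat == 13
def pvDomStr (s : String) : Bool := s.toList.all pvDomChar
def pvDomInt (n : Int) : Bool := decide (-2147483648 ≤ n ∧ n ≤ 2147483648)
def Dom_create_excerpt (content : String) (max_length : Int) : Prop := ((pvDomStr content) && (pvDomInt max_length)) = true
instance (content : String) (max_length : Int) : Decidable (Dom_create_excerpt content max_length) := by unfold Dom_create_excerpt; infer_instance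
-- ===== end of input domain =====

-- B fuses A's ten replace passes and the split/join whitespace cleanup into one left-to-right
-- pass with a removal set and a pending-space flag (objective: alternative single-pass algorithm).

-- ===== PORT A =====
-- `text[:max_length].rsplit(' ', 1)[0]`: hand port (PySem has no rsplit) — everything before
-- the LAST occurrence of ' ' if any, else the whole list; exact for sep=' ', maxsplit=1, index 0.
def pvRsplit0 (t : List Char) : List Char :=
  match (t.reverse).findIdx? (· == ' ') with
  | some i => ((t.reverse).drop (i + 1)).reverse
  | none => t

def create_excerpt (content : String) (max_length : Int) : String :=
  let text0 := List.foldl (fun t (p : List Char) => PySem.Chars.replace t p [])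
      content.toList [['#'], ['*'], ['_'], ['`'], ['['], [']'], ['('], [')'], ['>'], ['|']]
  let text := PySem.Chars.join [' '] (PySem.Chars.split₀ text0)
  if (text.length : Int) ≤ max_length then String.ofList text
  else String.ofList (pvRsplit0 (PySem.Chars.slice text none (some max_length)) ++ ['.', '.', '.'])

-- ===== PORT B =====
-- set('#*_`[]()>|') — the set of that string's characters
def pvRemove : PySem.Set Char := PySem.Set.ofList ['#', '*', '_', '`', '[', ']', '(', ')', '>', '|']

-- B's loop; `out` is the output list accumulated in reverse (list.append ↦ cons), joined at the end.
def pvGoB : List Char → List Char → Bool → List Char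
  | [], out, _ => out.reverse
  | c :: rest, out, pending =>
    if PySem.Set.contains pvRemove c then pvGoB rest out pending
    else if PySem.Chars.isspace c then pvGoB rest out true
    else pvGoB rest (c :: (if pending && !out.isEmpty then ' ' :: out else out)) false

def create_excerpt_alt (content : String) (max_length : Int) : String :=
  let text := pvGoB content.toList [] false
  if (text.length : Int) ≤ max_length then String.ofList text
  else String.ofList (pvRsplit0 (PySem.Chars.slice text none (some max_length)) ++ ['.', '.', '.'])

-- ===== PRECONDITION & SPEC =====
def Spec_create_excerpt (content : String) (max_length : Int) (out : String) : Prop := out = create_excerpt_alt content max_length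
instance (content : String) (max_length : Int) (out : String) : Decidable (Spec_create_excerpt content max_length out) := by unfold Spec_create_excerpt; infer_instance

-- ===== CLAIM (what is proved, stated in full; the proofs are below) =====
def Claim_equal_create_excerpt : Prop := ∀ (content : String) (max_length : Int), Dom_create_excerpt content max_length → Spec_create_excerpt content max_length (create_excerpt content max_length)

-- ===== LEMMAS AND PROOFS =====

-- one replace pass with a single-char pattern and empty replacement is a filter
theorem replace_go_single (c : Char) (l : List Char) : ∀ (fuel : Nat) (acc : List Char),
    l.length ≤ fuel →
    PySem.Chars.replace.go [c] [] fuel l acc = acc.reverse ++ l.filter (fun x => x != c) := by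
  induction l with
  | nil =>
    intro fuel acc _
    cases fuel <;> simp [PySem.Chars.replace.go]
  | cons c' t ih =>
    intro fuel acc hlen
    cases fuel with
    | zero => simp at hlen
    | succ f =>
      have hf : t.length ≤ f := by simpa using hlen
      by_cases h : c = c'
      · subst h
        simp [PySem.Chars.replace.go, List.isPrefixOf, ih f acc hf, List.filter]
      · have hb : ([c].isPrefixOf (c' :: t)) = false := by
          simp [List.isPrefixOf]; exact h
        simp [PySem.Chars.replace.go, hb, ih f (c' :: acc) hf, List.filter,
          show (c' != c) = true by simpa using fun hc => h hc.symm]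

theorem replace_single (c : Char) (l : List Char) :
    PySem.Chars.replace l [c] [] = l.filter (fun x => x != c) := by
  simpa using replace_go_single c l l.length [] le_rfl

-- A's ten replace passes = one filter by the removal set
theorem foldl_replace_eq_filter (l : List Char) :
    List.foldl (fun t (p : List Char) => PySem.Chars.replace t p [])
      l [['#'], ['*'], ['_'], ['`'], ['['], [']'], ['('], [')'], ['>'], ['|']]
      = l.filter (fun c => !(PySem.Set.contains pvRemove c)) := by
  simp only [List.foldl, replace_single, List.filter_filter]
  apply List.filter_congr
  intro c _
  have hmem : (PySem.Set.contains pvRemove c = true) ↔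
      (c = '#' ∨ c = '*' ∨ c = '_' ∨ c = '`' ∨ c = '[' ∨ c = ']' ∨ c = '(' ∨ c = ')' ∨ c = '>' ∨ c = '|') := by
    rw [PySem.Set.contains_iff]
    simp [pvRemove, PySem.Set.mem_ofList]
  rw [Bool.eq_iff_iff]
  simp only [Bool.and_eq_true, bne_iff_ne, ne_eq, Bool.not_eq_true', ← Bool.not_eq_true, hmem]
  tauto

-- pure collapse pass (B's loop after the removal filter is factored out)
def pvCollapse : List Char → List Char → Bool → List Char
  | [], out, _ => out.reverse
  | c :: rest, out, pending =>
    if PySem.Chars.isspace c then pvCollapse rest out true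
    else pvCollapse rest (c :: (if pending && !out.isEmpty then ' ' :: out else out)) false

theorem pvGoB_eq_collapse (cs : List Char) : ∀ out pending,
    pvGoB cs out pending = pvCollapse (cs.filter (fun c => !(PySem.Set.contains pvRemove c))) out pending := by
  induction cs with
  | nil => intro out pending; rfl
  | cons c rest ih =>
    intro out pending
    by_cases hm : c ∈ pvRemove
    · have hr : PySem.Set.contains pvRemove c = true := (PySem.Set.contains_iff _ _).mpr hm
      simp [pvGoB, hm, ih]
    · have hr : PySem.Set.contains pvRemove c = false := by
        simpa using (fun h => hm ((PySem.Set.contains_iff _ _).mp h))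
      by_cases hs : PySem.Chars.isspace c = true <;>
        simp [pvGoB, pvCollapse, hm, hs, ih]

-- reversed text of the completed words
def pvR (acc : List (List Char)) : List Char := (List.intercalate [' '] acc.reverse).reverse

def pvSep (acc : List (List Char)) : List Char := if acc = [] then [] else [' ']

theorem intercalate_cons₂ (s x x' : List Char) (l : List (List Char)) :
    List.intercalate s (x :: x' :: l) = x ++ s ++ List.intercalate s (x' :: l) := by
  simp [List.intercalate]

theorem intercalate_concat (s y : List Char) (xs : List (List Char)) (h : xs ≠ []) :
    List.intercalate s (xs ++ [y]) = List.intercalate s xs ++ s ++ y := by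
  induction xs with
  | nil => exact absurd rfl h
  | cons x xs ih =>
    cases xs with
    | nil => simp [List.intercalate, List.intersperse]
    | cons x' xs' =>
      have h2 := ih (by simp)
      calc s.intercalate (x :: x' :: xs' ++ [y])
          = x ++ s ++ s.intercalate (x' :: xs' ++ [y]) := intercalate_cons₂ s x x' (xs' ++ [y])
        _ = x ++ s ++ (s.intercalate (x' :: xs') ++ s ++ y) := by rw [h2]
        _ = s.intercalate (x :: x' :: xs') ++ s ++ y := by rw [intercalate_cons₂ s x x' xs']; simp

theorem intercalate_cons_ne_nil (s w : List Char) (rest : List (List Char)) (hw : w ≠ []) :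
    List.intercalate s (w :: rest) ≠ [] := by
  cases rest with
  | nil => simpa [List.intercalate, List.intersperse]
  | cons r rs => rw [intercalate_cons₂]; simp [hw]

theorem pvR_ne_nil (acc : List (List Char)) (hacc : acc ≠ []) (hw : ∀ w ∈ acc, w ≠ []) :
    pvR acc ≠ [] := by
  unfold pvR
  obtain ⟨w, rest, hrep⟩ : ∃ w rest, acc.reverse = w :: rest := by
    cases h : acc.reverse with
    | nil => exact absurd (by simpa using congrArg List.reverse h) hacc
    | cons w rest => exact ⟨w, rest, rfl⟩
  rw [hrep]
  have hwne : w ≠ [] := hw w (by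
    have : w ∈ acc.reverse := by rw [hrep]; exact List.mem_cons_self
    simpa using this)
  simp [intercalate_cons_ne_nil [' '] w rest hwne]

theorem pvR_push (cur : List Char) (acc : List (List Char)) :
    pvR (cur.reverse :: acc) = cur ++ pvSep acc ++ pvR acc := by
  unfold pvR pvSep
  rw [show (cur.reverse :: acc).reverse = acc.reverse ++ [cur.reverse] by simp]
  by_cases h : acc = []
  · subst h; simp [List.intercalate]
  · rw [intercalate_concat [' '] cur.reverse acc.reverse (by simpa using h)]
    simp [h]

-- the core invariant: the collapse pass computes ' '.join(split()) — both states at once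
theorem collapse_split (cs : List Char) : ∀ (acc : List (List Char)), (∀ w ∈ acc, w ≠ []) →
    ((∀ pending, (acc = [] ∨ pending = true) →
        pvCollapse cs (pvR acc) pending = PySem.Chars.join [' '] (PySem.Chars.split₀.go cs [] acc))
     ∧ (∀ cur, cur ≠ [] →
        pvCollapse cs (cur ++ pvSep acc ++ pvR acc) false
          = PySem.Chars.join [' '] (PySem.Chars.split₀.go cs cur acc))) := by
  induction cs with
  | nil =>
    intro acc hw
    constructor
    · intro pending _
      simp [pvCollapse, PySem.Chars.split₀.go, PySem.Chars.join, pvR]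
    · intro cur hc
      rw [← pvR_push cur acc]
      simp [pvCollapse, PySem.Chars.split₀.go, PySem.Chars.join, List.isEmpty_eq_false_iff.mpr hc, pvR]
  | cons c rest ih =>
    intro acc hw
    constructor
    · intro pending hp
      by_cases hs : PySem.Chars.isspace c = true
      · -- space: stay between words
        simp only [pvCollapse, hs, PySem.Chars.split₀.go, List.isEmpty_nil, if_pos]
        exact (ih acc hw).1 true (Or.inr rfl)
      · -- nonspace: start a word
        rcases hp with hnil | hpend
        · subst hnil
          have h1 := (ih ([] : List (List Char)) (by simp)).2 [c] (by simp)
          simpa [pvCollapse, hs, PySem.Chars.split₀.go, pvR, pvSep, List.intercalate] using h1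
        · subst hpend
          by_cases hnil : acc = []
          · subst hnil
            have h1 := (ih ([] : List (List Char)) (by simp)).2 [c] (by simp)
            simpa [pvCollapse, hs, PySem.Chars.split₀.go, pvR, pvSep, List.intercalate] using h1
          · have hne := pvR_ne_nil acc hnil hw
            have h1 := (ih acc hw).2 [c] (by simp)
            have hout : (c :: (if true && !(pvR acc).isEmpty then ' ' :: pvR acc else pvR acc))
                = [c] ++ pvSep acc ++ pvR acc := by
              simp [pvSep, hnil, hne]
            simp only [pvCollapse, PySem.Chars.split₀.go, if_neg hs, hout]
            simpa [pvCollapse, hs] using h1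
    · intro cur hc
      by_cases hs : PySem.Chars.isspace c = true
      · -- space: close the word
        have hacc' : ∀ w ∈ (cur.reverse :: acc), w ≠ [] := by
          intro w hwm
          rcases List.mem_cons.mp hwm with h | h
          · subst h; simpa using hc
          · exact hw w h
        have h1 := (ih (cur.reverse :: acc) hacc').1 true (Or.inr rfl)
        rw [pvR_push cur acc] at h1
        simpa [pvCollapse, hs, PySem.Chars.split₀.go, List.isEmpty_eq_false_iff.mpr hc] using h1
      · -- nonspace: extend the word
        have h1 := (ih acc hw).2 (c :: cur) (by simp)
        simpa [pvCollapse, hs, PySem.Chars.split₀.go] using h1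

theorem text_eq (l : List Char) :
    pvGoB l [] false
      = PySem.Chars.join [' '] (PySem.Chars.split₀ (l.filter (fun c => !(PySem.Set.contains pvRemove c)))) := by
  rw [pvGoB_eq_collapse]
  have h := (collapse_split (l.filter (fun c => !(PySem.Set.contains pvRemove c))) [] (by simp)).1 false (Or.inl rfl)
  simpa [pvR, PySem.Chars.split₀] using h

-- ===== VERDICT (by name: the statement is the Claim_ definition above) =====
theorem create_excerpt_spec : Claim_equal_create_excerpt := by
  intro content max_length _
  simp only [Spec_create_excerpt, create_excerpt, create_excerpt_alt, foldl_replace_eq_filter,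
    text_eq]
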